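-- pv_equiv track=rewrite | github.com/quentinkaci/APP-ERO | src/matching.py | find_exposed_vertices
-- ===== SOURCE A (Python) =====
-- def find_exposed_vertices(n, matching):
--     res = []
--     for v in range(n):
--         found = False
--         for (s, d) in matching:
--             if v == s or v == d:
--                 found = True
--                 break
--         if not found:
--             res.append(v)
--     return res
-- ===== SOURCE B (Python) =====
-- def find_exposed_vertices(n, matching):
--     exposed = [True] * n
--     for (s, d) in matching:
--         if 0 <= s < n:
--             exposed[s] = False
--         if 0 <= d < n:
--             exposed[d] = False
--     return [v for v in range(n) if exposed[v]]
-- ===== Notes on version B (the rewrite author's own statement) =====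
-- stated objective: faster
-- what changed: Replaces the per-vertex inner scan of the matching by a single edge-marking pass over a boolean table followed by one sweep of range(n).
import Mathlib
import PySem

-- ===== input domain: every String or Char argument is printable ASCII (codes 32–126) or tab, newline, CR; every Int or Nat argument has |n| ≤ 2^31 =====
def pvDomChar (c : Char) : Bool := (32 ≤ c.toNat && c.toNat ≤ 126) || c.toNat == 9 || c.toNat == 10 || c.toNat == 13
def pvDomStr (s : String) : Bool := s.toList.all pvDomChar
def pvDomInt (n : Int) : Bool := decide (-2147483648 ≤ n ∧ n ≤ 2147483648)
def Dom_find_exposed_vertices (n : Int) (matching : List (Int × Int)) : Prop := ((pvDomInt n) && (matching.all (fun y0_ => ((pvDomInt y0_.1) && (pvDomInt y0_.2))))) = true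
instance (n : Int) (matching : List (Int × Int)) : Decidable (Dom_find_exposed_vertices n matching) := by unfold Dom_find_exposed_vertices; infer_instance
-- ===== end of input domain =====

-- B replaces A's per-vertex scan of the matching by one edge-marking pass over a
-- boolean table followed by a single sweep of range(n) (objective: faster).

-- ===== PORT A =====
-- inner 'for (s, d) in matching: if v == s or v == d: found = True; break'
def pvFoundLoop (v : Int) : List (Int × Int) → Bool
  | [] => false
  | (s, d) :: rest => if v = s ∨ v = d then true else pvFoundLoop v rest

def find_exposed_vertices (n : Int) (matching : List (Int × Int)) : List Int :=
  (PySem.List.pyRange 0 n 1).foldl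
    (fun res v => if !(pvFoundLoop v matching) then res ++ [v] else res) []

-- ===== PORT B =====
-- 'for (s, d) in matching: if 0 <= s < n: exposed[s] = False; if 0 <= d < n: exposed[d] = False'
def pvMarkLoop (n : Int) (exposed : List Bool) : List (Int × Int) → List Bool
  | [] => exposed
  | (s, d) :: rest =>
      let e1 := if 0 ≤ s ∧ s < n then exposed.set s.toNat false else exposed
      let e2 := if 0 ≤ d ∧ d < n then e1.set d.toNat false else e1
      pvMarkLoop n e2 rest

def find_exposed_vertices_alt (n : Int) (matching : List (Int × Int)) : List Int :=
  let exposed := pvMarkLoop n (List.replicate n.toNat true) matching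
  (PySem.List.pyRange 0 n 1).foldl
    (fun res v => if exposed.getD v.toNat false then res ++ [v] else res) []

-- ===== PRECONDITION & SPEC =====
def Spec_find_exposed_vertices (n : Int) (matching : List (Int × Int)) (out : List Int) : Prop := out = find_exposed_vertices_alt n matching
instance (n : Int) (matching : List (Int × Int)) (out : List Int) : Decidable (Spec_find_exposed_vertices n matching out) := by unfold Spec_find_exposed_vertices; infer_instance

-- ===== CLAIM (what is proved, stated in full; the proofs are below) =====
def Claim_equal_find_exposed_vertices : Prop := ∀ (n : Int) (matching : List (Int × Int)), Dom_find_exposed_vertices n matching → Spec_find_exposed_vertices n matching (find_exposed_vertices n matching)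

-- ===== LEMMAS AND PROOFS =====

theorem pvFoundLoop_eq_any (v : Int) (m : List (Int × Int)) :
    pvFoundLoop v m = m.any (fun e => decide (v = e.1 ∨ v = e.2)) := by
  induction m with
  | nil => rfl
  | cons e rest ih =>
    obtain ⟨s, d⟩ := e
    simp only [pvFoundLoop, List.any_cons, ih]
    by_cases h : v = s ∨ v = d <;> simp [h]

theorem pvMarkLoop_getD (n : Int) (m : List (Int × Int)) (exposed : List Bool) (i : Nat)
    (hlen : exposed.length = n.toNat) :
    (pvMarkLoop n exposed m).getD i false =
      (exposed.getD i false &&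
        !(m.any (fun e => decide ((0 ≤ e.1 ∧ e.1 < n ∧ e.1.toNat = i) ∨ (0 ≤ e.2 ∧ e.2 < n ∧ e.2.toNat = i))))) := by
  induction m generalizing exposed with
  | nil => simp [pvMarkLoop]
  | cons e rest ih =>
    obtain ⟨s, d⟩ := e
    simp only [pvMarkLoop]
    have hlen1 : (if 0 ≤ s ∧ s < n then exposed.set s.toNat false else exposed).length = n.toNat := by
      split_ifs <;> simp [hlen]
    have hlen2 : ((if 0 ≤ d ∧ d < n then (if 0 ≤ s ∧ s < n then exposed.set s.toNat false else exposed).set d.toNat false else (if 0 ≤ s ∧ s < n then exposed.set s.toNat false else exposed))).length = n.toNat := by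
      split_ifs <;> simp [hlen]
    rw [ih _ hlen2]
    simp only [List.any_cons]
    -- reduce to the head step: getD after the two conditional sets
    have hstep : ∀ (l : List Bool), l.length = n.toNat →
        ((if 0 ≤ d ∧ d < n then l.set d.toNat false else l)).getD i false =
          (l.getD i false && !(decide (0 ≤ d ∧ d < n ∧ d.toNat = i))) := by
      intro l hl
      split_ifs with hd
      · by_cases hi : d.toNat = i
        · subst hi
          have hlt : d.toNat < l.length := by omega
          simp [List.getD_eq_getElem?_getD, List.getElem?_set_self hlt, hd]
        · simp [List.getD_eq_getElem?_getD, List.getElem?_set_ne hi, hd, hi]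
      · have : ¬ (0 ≤ d ∧ d < n ∧ d.toNat = i) := by tauto
        simp [this]
    rw [hstep _ hlen1]
    have hstep2 :
        ((if 0 ≤ s ∧ s < n then exposed.set s.toNat false else exposed)).getD i false =
          (exposed.getD i false && !(decide (0 ≤ s ∧ s < n ∧ s.toNat = i))) := by
      split_ifs with hs
      · by_cases hi : s.toNat = i
        · subst hi
          have hlt : s.toNat < exposed.length := by omega
          simp [List.getD_eq_getElem?_getD, List.getElem?_set_self hlt, hs]
        · simp [List.getD_eq_getElem?_getD, List.getElem?_set_ne hi, hs, hi]
      · have : ¬ (0 ≤ s ∧ s < n ∧ s.toNat = i) := by tauto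
        simp [this]
    rw [hstep2]
    by_cases h1 : (0 ≤ s ∧ s < n ∧ s.toNat = i) <;> by_cases h2 : (0 ≤ d ∧ d < n ∧ d.toNat = i) <;>
      simp [h1, h2]

theorem pvExposed_getD (n : Int) (m : List (Int × Int)) (v : Int) (hv0 : 0 ≤ v) (hvn : v < n) :
    (pvMarkLoop n (List.replicate n.toNat true) m).getD v.toNat false =
      !(pvFoundLoop v m) := by
  rw [pvMarkLoop_getD n m _ v.toNat (by simp), pvFoundLoop_eq_any]
  have hrep : (List.replicate n.toNat true).getD v.toNat false = true := by
    have : v.toNat < n.toNat := by omega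
    simp [List.getD_eq_getElem?_getD, this]
  rw [hrep]
  simp only [Bool.true_and]
  have hfun : (fun (e : Int × Int) => decide ((0 ≤ e.1 ∧ e.1 < n ∧ e.1.toNat = v.toNat) ∨ (0 ≤ e.2 ∧ e.2 < n ∧ e.2.toNat = v.toNat))) = (fun (e : Int × Int) => decide (v = e.1 ∨ v = e.2)) := by
    funext e
    have hiff : ((0 ≤ e.1 ∧ e.1 < n ∧ e.1.toNat = v.toNat) ∨ (0 ≤ e.2 ∧ e.2 < n ∧ e.2.toNat = v.toNat)) ↔ (v = e.1 ∨ v = e.2) := by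
      constructor
      · rintro (⟨h1, _, h3⟩ | ⟨h1, _, h3⟩)
        · left; omega
        · right; omega
      · rintro (h | h) <;> subst h
        · left; exact ⟨hv0, hvn, rfl⟩
        · right; exact ⟨hv0, hvn, rfl⟩
    simp [hiff]
  exact congrArg (fun p => !(m.any p)) hfun

-- ===== VERDICT (by name: the statement is the Claim_ definition above) =====
theorem find_exposed_vertices_spec : Claim_equal_find_exposed_vertices := by
  intro n matching _
  unfold Spec_find_exposed_vertices find_exposed_vertices find_exposed_vertices_alt
  apply PySem.List.foldl_congr_mem
  intro res v hv
  rw [PySem.List.mem_pyRange_one] at hv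
  rw [pvExposed_getD n matching v hv.1 hv.2]
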